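-- pv_equiv track=rewrite | github.com/django/django | django/core/signing.py | b62_encode
-- ===== SOURCE A (Python) =====
-- BASE62_ALPHABET = "0123456789ABCDEFGHIJKLMNOPQRSTUVWXYZabcdefghijklmnopqrstuvwxyz"
--
-- def b62_encode(s):
--     if s == 0:
--         return "0"
--     sign = "-" if s < 0 else ""
--     s = abs(s)
--     encoded = ""
--     while s > 0:
--         s, remainder = divmod(s, 62)
--         encoded = BASE62_ALPHABET[remainder] + encoded
--     return sign + encoded
-- ===== SOURCE B (Python) =====
-- BASE62_ALPHABET = "0123456789ABCDEFGHIJKLMNOPQRSTUVWXYZabcdefghijklmnopqrstuvwxyz"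
--
-- def _b62_digits(s):
--     if s == 0:
--         return ""
--     return _b62_digits(s // 62) + BASE62_ALPHABET[s % 62]
--
-- def b62_encode(s):
--     if s == 0:
--         return "0"
--     if s < 0:
--         return "-" + b62_encode(-s)
--     return _b62_digits(s)
-- ===== Notes on version B (the rewrite author's own statement) =====
-- stated objective: simpler
-- what changed: Replaces the while-loop that prepends digits to an accumulator with a recursive helper that descends on the quotient and builds most-significant digits first via the call stack; the sign is handled by a recursive wrapper on the negated value.
import Mathlib
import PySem

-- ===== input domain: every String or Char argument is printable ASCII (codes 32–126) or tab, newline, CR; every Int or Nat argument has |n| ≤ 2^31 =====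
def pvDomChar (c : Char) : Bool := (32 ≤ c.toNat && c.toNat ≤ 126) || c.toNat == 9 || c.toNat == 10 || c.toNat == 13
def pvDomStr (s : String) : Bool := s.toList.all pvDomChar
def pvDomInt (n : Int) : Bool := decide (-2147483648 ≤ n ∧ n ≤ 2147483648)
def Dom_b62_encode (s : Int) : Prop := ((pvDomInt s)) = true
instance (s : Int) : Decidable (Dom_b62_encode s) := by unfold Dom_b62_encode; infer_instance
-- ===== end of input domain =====

-- B replaces A's accumulator while-loop with a recursive helper building digits most-significant-first (simpler decomposition; same cost).


def BASE62_ALPHABET : String := "0123456789ABCDEFGHIJKLMNOPQRSTUVWXYZabcdefghijklmnopqrstuvwxyz"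

-- one alphabet digit; remainder is always 0..61 here, so getD's default is never used (exact)
def b62_digit (r : Nat) : String := String.singleton (BASE62_ALPHABET.toList.getD r '0')

-- ===== PORT A =====
-- the while-loop; s = abs(original s) is nonnegative, so Python's divmod = Nat div/mod (exact)
def b62_loopA (s : Nat) (encoded : String) : String :=
  if h : s > 0 then b62_loopA (s / 62) (b62_digit (s % 62) ++ encoded) else encoded
termination_by s
decreasing_by exact Nat.div_lt_self h (by norm_num)

def b62_encode (s : Int) : String :=
  if s == 0 then "0"
  else
    let sign := if s < 0 then "-" else ""
    sign ++ b62_loopA s.natAbs ""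

-- ===== PORT B =====
def b62_helperB (s : Nat) : String :=
  if h : s = 0 then "" else b62_helperB (s / 62) ++ b62_digit (s % 62)
termination_by s
decreasing_by exact Nat.div_lt_self (Nat.pos_of_ne_zero h) (by norm_num)

def b62_encode_alt (s : Int) : String :=
  if s = 0 then "0"
  else if hn : s < 0 then "-" ++ b62_encode_alt (-s)
  else b62_helperB s.natAbs
termination_by (if s < 0 then 1 else 0 : Nat)
decreasing_by simp [hn]; omega

-- ===== PRECONDITION & SPEC =====
def Spec_b62_encode (s : Int) (out : String) : Prop := out = b62_encode_alt s
instance (s : Int) (out : String) : Decidable (Spec_b62_encode s out) := by unfold Spec_b62_encode; infer_instance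

-- ===== CLAIM (what is proved, stated in full; the proofs are below) =====
def Claim_equal_b62_encode : Prop := ∀ (s : Int), Dom_b62_encode s → Spec_b62_encode s (b62_encode s)

-- ===== LEMMAS AND PROOFS =====

-- A's loop prepends into its accumulator exactly the digit string B's helper builds
theorem loopA_eq_helperB (s : Nat) : ∀ enc : String, b62_loopA s enc = b62_helperB s ++ enc := by
  induction s using Nat.strong_induction_on with
  | _ s ih =>
    intro enc
    rw [b62_loopA, b62_helperB]
    by_cases h : s > 0
    · simp only [h, dif_pos, dif_neg (Nat.pos_iff_ne_zero.mp h)]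
      rw [ih (s / 62) (Nat.div_lt_self h (by norm_num))]
      simp [String.append_assoc]
    · simp [h, Nat.eq_zero_of_not_pos h]

-- ===== VERDICT (by name: the statement is the Claim_ definition above) =====
theorem b62_encode_spec : Claim_equal_b62_encode := by
  intro s _
  unfold Spec_b62_encode
  rw [b62_encode, b62_encode_alt]
  by_cases h0 : s = 0
  · simp [h0]
  · simp only [h0, beq_iff_eq, if_neg h0]
    by_cases hn : s < 0
    · rw [dif_pos hn, b62_encode_alt]
      have : ¬ (-s = 0) := by omega
      rw [if_neg this, dif_neg (by omega : ¬ (-s < 0))]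
      simp [hn, loopA_eq_helperB, Int.natAbs_neg]
    · rw [dif_neg hn]
      simp [hn, loopA_eq_helperB]
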